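-- pv_equiv track=rewrite | github.com/tsani/coding-cat-public | same-adjacent/mutation_2.py | same_adjacent
-- ===== SOURCE A (Python) =====
-- def same_adjacent(str, char):
--     '''
--         Mistake: Double counting
--     '''
--     count = 0
--     adjacent = False
--     for i in range(len(str)):
--         if str[i] == char:
--             count += 1
--             if i > 0 and str[i-1] == char:
--                 adjacent = True
--                 count += 1      # Incorrectly count twice
--     return count if adjacent else 0
-- ===== SOURCE B (Python) =====
-- from itertools import groupby
--
-- def same_adjacent(str, char):
--     # Walk maximal runs of equal characters; a run of char of length L
--     # contributes L + (L-1) = 2*L - 1 (occurrences plus double-counted pairs),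
--     # and any such run with L >= 2 means an adjacent pair exists.
--     total = 0
--     adjacent = False
--     for value, group in groupby(str):
--         if value == char:
--             length = sum(1 for _ in group)
--             total += 2 * length - 1
--             if length >= 2:
--                 adjacent = True
--     return total if adjacent else 0
-- ===== Notes on version B (the rewrite author's own statement) =====
-- stated objective: idiomatic
-- what changed: Replaces the index loop with a look-back adjacency flag by an itertools.groupby pass over maximal runs, adding 2*L-1 per matching run and flagging runs of length >= 2.
import Mathlib
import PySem

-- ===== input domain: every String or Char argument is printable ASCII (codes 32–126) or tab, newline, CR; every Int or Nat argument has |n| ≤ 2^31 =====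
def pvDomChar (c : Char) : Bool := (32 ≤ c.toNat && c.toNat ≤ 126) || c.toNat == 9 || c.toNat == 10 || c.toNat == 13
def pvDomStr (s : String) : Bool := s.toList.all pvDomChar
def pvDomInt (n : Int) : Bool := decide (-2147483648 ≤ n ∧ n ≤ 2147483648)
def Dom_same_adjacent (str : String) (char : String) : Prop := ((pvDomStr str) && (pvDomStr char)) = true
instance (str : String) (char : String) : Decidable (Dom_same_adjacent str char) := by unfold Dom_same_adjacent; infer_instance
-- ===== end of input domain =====

-- B replaces A's index loop with a look-back adjacency flag by a groupby-style
-- pass over maximal runs (objective: idiomatic); same return value everywhere.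

-- ===== PORT A =====
-- Python's str[i] is a one-character string; 'str[i] == char' is ported as
-- comparing the singleton code-point list with char.toList (exact: equal iff
-- that one-char string equals char). The index is always in range, so the
-- none branch (IndexError) is unreachable.
def pvCharEq (o : Option Char) (ch : List Char) : Bool :=
  match o with
  | some c => [c] == ch
  | none => false

def same_adjacent (str : String) (char : String) : Int :=
  let s := str.toList
  let r := (PySem.List.pyRange 0 (PySem.Chars.len s) 1).foldl
    (fun (acc : Int × Bool) (i : Int) =>
      if pvCharEq (PySem.List.pyGet? s i) char.toList then
        let count := acc.1 + 1
        if decide (i > 0) && pvCharEq (PySem.List.pyGet? s (i - 1)) char.toList then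
          (count + 1, true)
        else (count, acc.2)
      else acc)
    (0, false)
  if r.2 then r.1 else 0

-- ===== PORT B =====
-- itertools.groupby(str): each step consumes the maximal run of the head char.
def pvBgroups (ch : List Char) : List Char → Int × Bool
  | [] => (0, false)
  | x :: t =>
    let run := t.takeWhile (· == x)
    let rest := t.dropWhile (· == x)
    let r := pvBgroups ch rest
    if [x] == ch then
      let L : Int := 1 + (run.length : Int)
      (r.1 + (2 * L - 1), r.2 || decide (2 ≤ L))
    else r
termination_by l => l.length
decreasing_by
  have := List.length_dropWhile_le (fun y => y == x) t
  simp at *; omega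

def same_adjacent_alt (str : String) (char : String) : Int :=
  let r := pvBgroups char.toList str.toList
  if r.2 then r.1 else 0

-- ===== PRECONDITION & SPEC =====
def Spec_same_adjacent (str : String) (char : String) (out : Int) : Prop := out = same_adjacent_alt str char
instance (str : String) (char : String) (out : Int) : Decidable (Spec_same_adjacent str char out) := by unfold Spec_same_adjacent; infer_instance

-- ===== CLAIM (what is proved, stated in full; the proofs are below) =====
def Claim_equal_same_adjacent : Prop := ∀ (str : String) (char : String), Dom_same_adjacent str char → Spec_same_adjacent str char (same_adjacent str char)

-- ===== LEMMAS AND PROOFS =====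

-- Common characterisation: scan left-to-right with a 'previous char matched' flag.
def pvScan (ch : List Char) (prev : Bool) : List Char → Int × Bool
  | [] => (0, false)
  | x :: t =>
    let r := pvScan ch ([x] == ch) t
    if [x] == ch then (r.1 + 1 + (if prev then 1 else 0), prev || r.2) else r

def pvLastFlag (ch : List Char) (prev : Bool) (l : List Char) : Bool :=
  match l.getLast? with
  | some y => [y] == ch
  | none => prev

theorem pvLastFlag_cons (ch : List Char) (prev : Bool) (y : Char) (l : List Char) :
    pvLastFlag ch prev (y :: l) = pvLastFlag ch ([y] == ch) l := by
  cases l with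
  | nil => simp [pvLastFlag]
  | cons a t =>
    obtain ⟨z, hz⟩ := Option.isSome_iff_exists.mp (by simp : (a :: t).getLast?.isSome)
    simp [pvLastFlag, hz]

theorem pvScan_concat (ch : List Char) (x : Char) :
    ∀ (l : List Char) (prev : Bool),
    pvScan ch prev (l ++ [x]) =
      (if [x] == ch then
        ((pvScan ch prev l).1 + 1 + (if pvLastFlag ch prev l then 1 else 0),
          pvLastFlag ch prev l || (pvScan ch prev l).2)
       else pvScan ch prev l) := by
  intro l
  induction l with
  | nil =>
    intro prev
    simp only [List.nil_append, pvScan, pvLastFlag, List.getLast?_nil]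
    split <;> rfl
  | cons y l ih =>
    intro prev
    simp only [List.cons_append, pvScan, ih ([y] == ch), pvLastFlag_cons]
    by_cases hx : ([x] == ch) = true <;>
    by_cases hy : ([y] == ch) = true <;>
      simp [hx, hy] <;>
      cases pl : pvLastFlag ch ([y] == ch) l <;>
      cases prev <;>
      simp <;> omega

-- The A-side fold step, named for the proofs.
def pvStepA (s : List Char) (ch : List Char) (acc : Int × Bool) (i : Int) : Int × Bool :=
  if pvCharEq (PySem.List.pyGet? s i) ch then
    let count := acc.1 + 1
    if decide (i > 0) && pvCharEq (PySem.List.pyGet? s (i - 1)) ch then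
      (count + 1, true)
    else (count, acc.2)
  else acc

theorem pvStepA_last (ch l : List Char) (x : Char) (q : Int × Bool) :
    pvStepA (l ++ [x]) ch q (l.length : Int) =
      (if [x] == ch then
        (q.1 + 1 + (if pvLastFlag ch false l then 1 else 0), pvLastFlag ch false l || q.2)
       else q) := by
  have hx : PySem.List.pyGet? (l ++ [x]) (l.length : Int) = some x := by simp
  have hpl : (decide ((l.length : Int) > 0) &&
      pvCharEq (PySem.List.pyGet? (l ++ [x]) ((l.length : Int) - 1)) ch)
      = pvLastFlag ch false l := by
    cases l with
    | nil => simp [pvLastFlag]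
    | cons y t =>
      have h1 : (((y :: t).length : Int)) - 1 = (((y :: t).length - 1 : Nat) : Int) := by
        simp
      have hget : PySem.List.pyGet? ((y :: t) ++ [x]) (((y :: t).length : Int) - 1)
          = (y :: t).getLast? := by
        rw [h1, PySem.List.pyGet?_of_nonneg _ (by positivity)]
        rw [Int.toNat_natCast, List.getElem?_append_left (by simp)]
        rw [← List.getLast?_eq_getElem?]
      obtain ⟨z, hz⟩ := Option.isSome_iff_exists.mp (by simp : (y :: t).getLast?.isSome)
      rw [hget, hz]
      simp [pvLastFlag, pvCharEq, hz]
  simp only [pvStepA, hpl, hx]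
  simp only [pvCharEq]
  by_cases hm : ([x] == ch) = true
  · simp only [hm, if_pos]
    cases hp : pvLastFlag ch false l <;> simp
  · simp [hm]

theorem pvFold_eq_scan (ch : List Char) :
    ∀ (s : List Char),
    (PySem.List.pyRange 0 (s.length : Int) 1).foldl (pvStepA s ch) (0, false) =
      pvScan ch false s := by
  intro s
  induction s using List.reverseRecOn with
  | nil => simp [PySem.List.pyRange_one_eq_nil, pvScan]
  | append_singleton l x ih =>
    have hlen : (((l ++ [x]).length : Nat) : Int) = (l.length : Int) + 1 := by simp
    rw [hlen, PySem.List.pyRange_one_succ_right (by positivity), List.foldl_append]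
    have hcongr : (PySem.List.pyRange 0 (l.length : Int) 1).foldl (pvStepA (l ++ [x]) ch) (0, false)
        = (PySem.List.pyRange 0 (l.length : Int) 1).foldl (pvStepA l ch) (0, false) := by
      apply PySem.List.foldl_congr_mem
      intro acc i hi
      rw [PySem.List.mem_pyRange_one] at hi
      obtain ⟨h0, h1⟩ := hi
      have hget : PySem.List.pyGet? (l ++ [x]) i = PySem.List.pyGet? l i := by
        rw [PySem.List.pyGet?_of_nonneg _ h0, PySem.List.pyGet?_of_nonneg _ h0]
        rw [List.getElem?_append_left (by omega)]
      by_cases hi0 : 0 < i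
      · have h0' : (0:Int) ≤ i - 1 := by omega
        have hget' : PySem.List.pyGet? (l ++ [x]) (i - 1) = PySem.List.pyGet? l (i - 1) := by
          rw [PySem.List.pyGet?_of_nonneg _ h0', PySem.List.pyGet?_of_nonneg _ h0']
          rw [List.getElem?_append_left (by omega)]
        simp only [pvStepA, hget, hget']
      · have hz : i = 0 := by omega
        subst hz
        have hd : decide ((0:Int) > 0) = false := rfl
        simp only [pvStepA, hget, hd, Bool.false_and]
    rw [hcongr, ih, List.foldl_cons, List.foldl_nil, pvStepA_last, pvScan_concat]

-- prev flag is irrelevant when the next char (if any) does not match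
theorem pvScan_prev_irrel (ch : List Char) (rest : List Char)
    (h : ∀ c, rest.head? = some c → ([c] == ch) = false) (p : Bool) :
    pvScan ch p rest = pvScan ch false rest := by
  cases rest with
  | nil => rfl
  | cons y t => simp [pvScan, h y rfl]

-- skipping a block of non-matching chars
theorem pvScan_skip (ch : List Char) :
    ∀ (ys rest : List Char), (∀ y ∈ ys, ([y] == ch) = false) →
    pvScan ch false (ys ++ rest) = pvScan ch false rest := by
  intro ys
  induction ys with
  | nil => intro rest _; rfl
  | cons y ys ih =>
    intro rest h
    have hy := h y (by simp)
    simp only [List.cons_append, pvScan, hy]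
    simp only [Bool.false_eq_true, if_false]
    exact ih rest (fun z hz => h z (by simp [hz]))

-- a run of matching chars, entered with prev = true
theorem pvScan_run (ch : List Char) (x : Char) (hx : ([x] == ch) = true) :
    ∀ (run rest : List Char), (∀ y ∈ run, y = x) →
    (∀ c, rest.head? = some c → ([c] == ch) = false) →
    pvScan ch true (run ++ rest) =
      (2 * (run.length : Int) + (pvScan ch false rest).1,
       (decide (run ≠ [])) || (pvScan ch false rest).2) := by
  intro run
  induction run with
  | nil =>
    intro rest _ hrest
    simp [pvScan_prev_irrel ch rest hrest true]
  | cons y run ih =>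
    intro rest hrun hrest
    have hy : y = x := hrun y (by simp)
    subst hy
    have hrec := ih rest (fun z hz => hrun z (by simp [hz])) hrest
    simp only [List.cons_append, pvScan, hrec, hx]
    simp
    ring

theorem pvBgroups_eq_scan (ch : List Char) :
    ∀ (l : List Char), pvBgroups ch l = pvScan ch false l := by
  have main : ∀ (n : Nat) (l : List Char), l.length ≤ n →
      pvBgroups ch l = pvScan ch false l := by
    intro n
    induction n with
    | zero =>
      intro l hl
      have : l = [] := by cases l <;> simp_all
      subst this; simp [pvBgroups, pvScan]
    | succ n ih =>
      intro l hl
      cases l with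
      | nil => simp [pvBgroups, pvScan]
      | cons x t =>
        have hsplit : t.takeWhile (· == x) ++ t.dropWhile (· == x) = t :=
          List.takeWhile_append_dropWhile
        have hlen : (t.dropWhile (· == x)).length ≤ n := by
          have := List.length_dropWhile_le (· == x) t
          simp at hl; omega
        have ihrest := ih (t.dropWhile (· == x)) hlen
        have hrun : ∀ y ∈ t.takeWhile (· == x), y = x := by
          intro y hy
          have := List.mem_takeWhile_imp hy
          simpa using this
        by_cases hm : ([x] == ch) = true
        · -- matching run
          have hch : ch = [x] := (eq_of_beq hm).symm
          have hrest : ∀ c, (t.dropWhile (· == x)).head? = some c → ([c] == ch) = false := by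
            intro c hc
            have hnot := List.head?_dropWhile_not (· == x) t
            rw [hc] at hnot
            have hnx : (c == x) = false := by simpa using hnot
            subst hch
            simpa using hnx
          refine Eq.symm ?_
          calc pvScan ch false (x :: t)
              = ((pvScan ch true t).1 + 1, (pvScan ch true t).2) := by
                simp [pvScan, hm]
            _ = pvBgroups ch (x :: t) := by
                rw [show pvScan ch true t = pvScan ch true (t.takeWhile (· == x) ++ t.dropWhile (· == x)) by rw [hsplit]]
                rw [pvScan_run ch x hm _ _ hrun hrest]
                simp only [pvBgroups, hm, if_pos, ihrest]
                refine Prod.ext ?_ ?_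
                · simp; push_cast; ring
                · rcases hrw : t.takeWhile (· == x) with _ | ⟨z, zs⟩
                  · simp
                  · simp
                    right
                    omega
        · -- non-matching run
          have hskip : ∀ y ∈ t.takeWhile (· == x), ([y] == ch) = false := by
            intro y hy
            rw [hrun y hy]
            simpa using hm
          calc pvBgroups ch (x :: t)
              = pvBgroups ch (t.dropWhile (· == x)) := by simp [pvBgroups, hm]
            _ = pvScan ch false (t.dropWhile (· == x)) := ihrest
            _ = pvScan ch false (t.takeWhile (· == x) ++ t.dropWhile (· == x)) :=
                (pvScan_skip ch _ _ hskip).symm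
            _ = pvScan ch false t := by rw [hsplit]
            _ = pvScan ch false (x :: t) := by simp [pvScan, hm]
  intro l
  exact main l.length l le_rfl

-- ===== VERDICT (by name: the statement is the Claim_ definition above) =====
theorem same_adjacent_spec : Claim_equal_same_adjacent := by
  intro str char _
  unfold Spec_same_adjacent same_adjacent same_adjacent_alt
  simp only [PySem.Chars.len_eq]
  rw [show (fun (acc : Int × Bool) (i : Int) =>
      if pvCharEq (PySem.List.pyGet? str.toList i) char.toList then
        let count := acc.1 + 1
        if decide (i > 0) && pvCharEq (PySem.List.pyGet? str.toList (i - 1)) char.toList then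
          (count + 1, true)
        else (count, acc.2)
      else acc) = pvStepA str.toList char.toList from rfl]
  rw [pvFold_eq_scan char.toList str.toList, pvBgroups_eq_scan]
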